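-- pv_equiv track=rewrite | github.com/AntonyCen03/Aty03 | modelo_parcial3.py | laptop_defectuoso
-- ===== SOURCE A (Python) =====
-- def laptop_defectuoso(palabra):
--     output=""
--     for j in palabra:
--         if j=="i":
--             output=output[::-1]
--         else:
--             output+=j
--     return output
-- ===== SOURCE B (Python) =====
-- def laptop_defectuoso(palabra):
--     # Keep two halves and a direction flag; flip the flag instead of reversing.
--     back = []    # chars after the pivot (in order, when facing forward)
--     front = []   # chars before the pivot (stored in reverse order)
--     forward = True
--     for c in palabra:
--         if c == "i":
--             forward = not forward
--         elif forward:
--             back.append(c)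
--         else:
--             front.append(c)
--     if forward:
--         return "".join(reversed(front)) + "".join(back)
--     else:
--         return "".join(reversed(back)) + "".join(front)
-- ===== Notes on version B (the rewrite author's own statement) =====
-- stated objective: alternative
-- what changed: Instead of reversing the accumulated string on every 'i' character, B keeps two char lists and a direction flag, flips the flag on 'i', appends each other char to the side the flag points to, and assembles the result once at the end.
import Mathlib
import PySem

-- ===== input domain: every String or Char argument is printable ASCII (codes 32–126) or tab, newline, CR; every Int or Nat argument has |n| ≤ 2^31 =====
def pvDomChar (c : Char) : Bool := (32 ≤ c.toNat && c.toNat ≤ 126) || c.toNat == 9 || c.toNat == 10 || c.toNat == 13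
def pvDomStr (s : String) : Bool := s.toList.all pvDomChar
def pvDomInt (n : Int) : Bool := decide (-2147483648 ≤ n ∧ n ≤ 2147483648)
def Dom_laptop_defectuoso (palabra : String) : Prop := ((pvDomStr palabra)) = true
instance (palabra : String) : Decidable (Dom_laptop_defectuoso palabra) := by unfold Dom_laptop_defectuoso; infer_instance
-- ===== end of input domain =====

-- B replaces A's reverse-on-each-marker string building by two halves plus a direction
-- flag, flipped on that character and assembled once at the end (objective: alternative).

-- ===== PORT A =====
-- A's loop: output starts empty; 'i' reverses it, any other char is appended.
def pvStepA (output : List Char) (j : Char) : List Char :=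
  if j = 'i' then output.reverse else output ++ [j]

def laptop_defectuoso (palabra : String) : String :=
  String.mk (palabra.toList.foldl pvStepA [])

-- ===== PORT B =====
-- B's loop state: (back, front, forward); 'i' flips the flag, other chars go to
-- back when forward, to front otherwise; assembled once at the end.
def pvStepB (st : List Char × List Char × Bool) (c : Char) : List Char × List Char × Bool :=
  if c = 'i' then (st.1, st.2.1, !st.2.2)
  else if st.2.2 then (st.1 ++ [c], st.2.1, st.2.2)
  else (st.1, st.2.1 ++ [c], st.2.2)

def laptop_defectuoso_alt (palabra : String) : String :=
  let st := palabra.toList.foldl pvStepB ([], [], true)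
  if st.2.2 then String.mk (st.2.1.reverse ++ st.1)
  else String.mk (st.1.reverse ++ st.2.1)

-- ===== PRECONDITION & SPEC =====
def Spec_laptop_defectuoso (palabra : String) (out : String) : Prop := out = laptop_defectuoso_alt palabra
instance (palabra : String) (out : String) : Decidable (Spec_laptop_defectuoso palabra out) := by unfold Spec_laptop_defectuoso; infer_instance

-- ===== CLAIM (what is proved, stated in full; the proofs are below) =====
def Claim_equal_laptop_defectuoso : Prop := ∀ (palabra : String), Dom_laptop_defectuoso palabra → Spec_laptop_defectuoso palabra (laptop_defectuoso palabra)

-- ===== LEMMAS AND PROOFS =====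

theorem laptop_key (cs : List Char) : ∀ (back front : List Char) (forward : Bool),
    cs.foldl pvStepA (if forward then front.reverse ++ back else back.reverse ++ front)
      = (let st := cs.foldl pvStepB (back, front, forward)
         if st.2.2 then st.2.1.reverse ++ st.1 else st.1.reverse ++ st.2.1) := by
  induction cs with
  | nil => intro back front forward; cases forward <;> simp
  | cons c cs ih =>
    intro back front forward
    by_cases hc : c = 'i'
    · cases forward
      · simpa [pvStepA, pvStepB, hc, List.foldl_cons, List.reverse_append] using
          ih back front true
      · simpa [pvStepA, pvStepB, hc, List.foldl_cons, List.reverse_append] using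
          ih back front false
    · cases forward
      · simpa [pvStepA, pvStepB, hc, List.foldl_cons, List.append_assoc] using
          ih back (front ++ [c]) false
      · simpa [pvStepA, pvStepB, hc, List.foldl_cons, List.append_assoc] using
          ih (back ++ [c]) front true

-- ===== VERDICT (by name: the statement is the Claim_ definition above) =====
theorem laptop_defectuoso_spec : Claim_equal_laptop_defectuoso := by
  intro palabra _
  unfold Spec_laptop_defectuoso laptop_defectuoso laptop_defectuoso_alt
  have h := laptop_key palabra.toList [] [] true
  simp only [List.reverse_nil, List.nil_append, if_true] at h
  rw [h]
  split <;> simp_all
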